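-- pv_equiv track=rewrite | github.com/Debiday/python-practice | randomproblems.py | isZigzag
-- ===== SOURCE A (Python) =====
-- def isZigzag(numbers):
--     # goal: construct array numbers.length - 2
--     # pattern: bigger than, smaller than
--         # if bigger than than: 0 and next is smaller than, follwed by bigger then:
--         # or if smaller than than: 0 and next is bigger than, follwed by smaller than: final.append(1)
--
--         final = []
--
--         for i in range(len(numbers)-2):
--             if (numbers[i] > numbers[i+1] and numbers[i+1] < numbers[i+2]) or (numbers[i] < numbers[i+1] and numbers[i+1] > numbers[i+2]):
--                 final.append(1)
--             else:
--                 final.append(0)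
--         return final
-- ===== SOURCE B (Python) =====
-- def isZigzag(numbers):
--     # Run-length encode the signs of consecutive differences, then write a 1
--     # into a preallocated zero array at each boundary between two runs of
--     # strictly opposite sign (a boundary between +1/-1 runs is a strict local
--     # extremum of the middle element; zero-sign runs never produce a 1).
--     n = len(numbers)
--     if n < 3:
--         return []
--     runs = []  # [sign, count] runs of the difference-sign sequence
--     prev = numbers[0]
--     for x in numbers[1:]:
--         s = (x > prev) - (x < prev)
--         if runs and runs[-1][0] == s:
--             runs[-1][1] += 1
--         else:
--             runs.append([s, 1])
--         prev = x
--     out = [0] * (n - 2)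
--     pos = 0
--     for (s, c), (t, _) in zip(runs, runs[1:]):
--         pos += c
--         if s * t == -1:
--             out[pos - 1] = 1
--     return out
-- ===== Notes on version B (the rewrite author's own statement) =====
-- stated objective: alternative
-- what changed: B replaces A's direct per-triple comparison loop with a two-phase algorithm: it run-length encodes the sign sequence of consecutive differences, then writes 1s into a preallocated zero array exactly at boundaries between runs of strictly opposite sign.
import Mathlib
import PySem

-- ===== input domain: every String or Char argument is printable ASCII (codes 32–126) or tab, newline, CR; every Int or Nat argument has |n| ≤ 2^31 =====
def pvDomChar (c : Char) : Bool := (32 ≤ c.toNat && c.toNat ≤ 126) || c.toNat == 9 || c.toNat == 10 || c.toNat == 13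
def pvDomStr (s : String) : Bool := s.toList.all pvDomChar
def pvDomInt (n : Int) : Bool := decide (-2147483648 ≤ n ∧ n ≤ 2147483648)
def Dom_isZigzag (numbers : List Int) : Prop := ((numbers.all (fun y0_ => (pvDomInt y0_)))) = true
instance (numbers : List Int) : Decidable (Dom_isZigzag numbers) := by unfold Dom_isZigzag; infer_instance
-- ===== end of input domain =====

-- B replaces A's per-triple test with a two-phase algorithm: run-length encode the
-- difference-sign sequence, then write 1s into a preallocated zero array at boundaries
-- between runs of strictly opposite sign; same asymptotic cost, different algorithm.

-- ===== PORT A =====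
-- for i in range(len(numbers)-2): append 1/0 depending on the triple test.
-- numbers[i], numbers[i+1], numbers[i+2]: i ranges over 0..len-3, always in range, so
-- pyGetD with default 0 is exact here (never hits the default).
def isZigzag (numbers : List Int) : List Int :=
  (PySem.List.pyRange 0 ((numbers.length : Int) - 2) 1).foldl
    (fun final i =>
      if (PySem.List.pyGetD numbers i 0 > PySem.List.pyGetD numbers (i+1) 0 ∧
            PySem.List.pyGetD numbers (i+1) 0 < PySem.List.pyGetD numbers (i+2) 0) ∨
         (PySem.List.pyGetD numbers i 0 < PySem.List.pyGetD numbers (i+1) 0 ∧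
            PySem.List.pyGetD numbers (i+1) 0 > PySem.List.pyGetD numbers (i+2) 0)
      then final ++ [1] else final ++ [0]) []

-- ===== PORT B =====
-- first loop body: s = (x > prev) - (x < prev); extend or start a [sign, count] run
-- (runs[-1][1] += 1 is ported as dropLast ++ [(t, c+1)]); state = (runs, prev).
def zzStep (st : List (Int × Int) × Int) (x : Int) : List (Int × Int) × Int :=
  let s : Int := (if st.2 < x then 1 else 0) - (if x < st.2 then 1 else 0)
  match st.1.getLast? with
  | some (t, c) => if t = s then (st.1.dropLast ++ [(t, c + 1)], x) else (st.1 ++ [(s, 1)], x)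
  | none => (st.1 ++ [(s, 1)], x)

-- second loop body over zip(runs, runs[1:]): pos += c; out[pos-1] = 1 when s*t == -1;
-- state = (out, pos); pos - 1 is always ≥ 0 here, so .toNat is exact.
def zzPlace (st : List Int × Int) (pr : (Int × Int) × (Int × Int)) : List Int × Int :=
  let pos := st.2 + pr.1.2
  if pr.1.1 * pr.2.1 = -1 then (st.1.set (pos - 1).toNat 1, pos) else (st.1, pos)

def isZigzag_alt (numbers : List Int) : List Int :=
  if numbers.length < 3 then []
  else
    let runs := (numbers.tail.foldl zzStep ([], numbers.headI)).1
    ((runs.zip runs.tail).foldl zzPlace (List.replicate (numbers.length - 2) 0, 0)).1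

-- ===== PRECONDITION & SPEC =====
def Spec_isZigzag (numbers : List Int) (out : List Int) : Prop := out = isZigzag_alt numbers
instance (numbers : List Int) (out : List Int) : Decidable (Spec_isZigzag numbers out) := by unfold Spec_isZigzag; infer_instance

-- ===== CLAIM (what is proved, stated in full; the proofs are below) =====
def Claim_equal_isZigzag : Prop := ∀ (numbers : List Int), Dom_isZigzag numbers → Spec_isZigzag numbers (isZigzag numbers)

-- ===== LEMMAS AND PROOFS =====

-- sign of the difference x - p, as B computes it
def zzSgn (p x : Int) : Int := (if p < x then 1 else 0) - (if x < p then 1 else 0)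

-- sign sequence of consecutive differences starting from previous value p
def zzSgnList (p : Int) : List Int → List Int
  | [] => []
  | x :: xs => zzSgn p x :: zzSgnList x xs

-- recursive run-length encoder of a sign list, with a current run (s, c)
def zzRle (s c : Int) : List Int → List (Int × Int)
  | [] => [(s, c)]
  | t :: ts => if s = t then zzRle s (c + 1) ts else (s, c) :: zzRle t 1 ts

-- decode runs back to the sign list
def zzDecode (runs : List (Int × Int)) : List Int :=
  runs.flatMap (fun r => List.replicate r.2.toNat r.1)

-- boundary indicator on adjacent signs
def zzPred (x y : Int) : Int := if x * y = -1 then 1 else 0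

-- reference zigzag array of a sign list
def zzZig (σ : List Int) : List Int := List.zipWith zzPred σ σ.tail

theorem zzSgnList_length (p : Int) (xs : List Int) : (zzSgnList p xs).length = xs.length := by
  induction xs generalizing p with
  | nil => rfl
  | cons x xs ih => simp [zzSgnList, ih]

theorem zzSgnList_eq_zipWith (p : Int) (xs : List Int) :
    zzSgnList p xs = List.zipWith zzSgn (p :: xs) xs := by
  induction xs generalizing p with
  | nil => rfl
  | cons x xs ih => simp only [zzSgnList, List.zipWith_cons_cons, ih]

-- first loop = recursive RLE of the sign sequence
theorem zzFold_eq_rle (xs : List Int) (p : Int) (pre : List (Int × Int)) (s c : Int) :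
    (xs.foldl zzStep (pre ++ [(s, c)], p)).1 = pre ++ zzRle s c (zzSgnList p xs) := by
  induction xs generalizing p pre s c with
  | nil => simp [zzSgnList, zzRle]
  | cons x xs ih =>
    simp only [List.foldl_cons]
    have hstep : zzStep (pre ++ [(s, c)], p) x =
        (if s = zzSgn p x then (pre ++ [(s, c + 1)], x) else (pre ++ [(s, c)] ++ [(zzSgn p x, 1)], x)) := by
      simp only [zzStep, List.getLast?_concat, List.dropLast_concat, zzSgn]
    rw [hstep]
    by_cases h : s = zzSgn p x
    · rw [if_pos h, ih]
      simp [zzSgnList, zzRle, h]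
    · rw [if_neg h, ih, List.append_assoc]
      simp [zzSgnList, zzRle, h]

theorem zzRle_ne_nil (ts : List Int) (s c : Int) : zzRle s c ts ≠ [] := by
  induction ts generalizing s c with
  | nil => simp [zzRle]
  | cons t ts ih =>
    unfold zzRle; split
    · exact ih s (c + 1)
    · simp

theorem zzRle_counts (ts : List Int) (s c : Int) (hc : 1 ≤ c) :
    ∀ r ∈ zzRle s c ts, 1 ≤ r.2 := by
  induction ts generalizing s c with
  | nil => simp [zzRle]; omega
  | cons t ts ih =>
    unfold zzRle
    split
    · exact ih s (c + 1) (by omega)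
    · intro r hr
      rcases List.mem_cons.mp hr with h | h
      · subst h; exact hc
      · exact ih t 1 (by omega) r h

theorem zzDecode_rle (ts : List Int) (s c : Int) (hc : 1 ≤ c) :
    zzDecode (zzRle s c ts) = List.replicate c.toNat s ++ ts := by
  induction ts generalizing s c with
  | nil => simp [zzRle, zzDecode]
  | cons t ts ih =>
    unfold zzRle
    by_cases h : s = t
    · rw [if_pos h, ih s (c + 1) (by omega)]
      have h1 : (c + 1).toNat = c.toNat + 1 := by omega
      rw [h1, List.replicate_succ', List.append_assoc, h]
      rfl
    · rw [if_neg h]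
      simp only [zzDecode, List.flatMap_cons] at *
      rw [ih t 1 (by omega)]
      simp

theorem zzDecode_len_pos (R : List (Int × Int)) (h1 : ∀ r ∈ R, 1 ≤ r.2) (hne : R ≠ []) :
    1 ≤ (zzDecode R).length := by
  cases R with
  | nil => exact absurd rfl hne
  | cons r R' =>
    have := h1 r (List.mem_cons_self)
    simp [zzDecode]
    omega

theorem zzPred_self (s : Int) : zzPred s s = 0 := by
  unfold zzPred
  rw [if_neg]
  nlinarith [mul_self_nonneg s]

theorem zzZig_cons (a : Int) (l : List Int) : zzZig (a :: l) = List.zipWith zzPred (a :: l) l := rfl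

theorem zzZig_rep_only (m : Nat) (s : Int) : zzZig (List.replicate (m + 1) s) = List.replicate m 0 := by
  induction m with
  | zero => rfl
  | succ m ih =>
    have h2 : List.replicate (m + 1) s = s :: List.replicate m s := List.replicate_succ
    have h3 : List.zipWith zzPred (s :: List.replicate m s) (List.replicate m s) =
        zzZig (List.replicate (m + 1) s) := by rw [h2, zzZig_cons]
    rw [List.replicate_succ (n := m + 1), zzZig_cons, h2, List.zipWith_cons_cons, zzPred_self,
      h3, ih]
    exact (List.replicate_succ).symm

theorem zzZig_rep (m : Nat) (s t : Int) (l' : List Int) :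
    zzZig (List.replicate (m + 1) s ++ t :: l') =
      List.replicate m 0 ++ zzPred s t :: zzZig (t :: l') := by
  induction m with
  | zero => simp [zzZig]
  | succ m ih =>
    have h1 : List.replicate (m + 1 + 1) s ++ t :: l' = s :: (List.replicate (m + 1) s ++ t :: l') := by
      simp [List.replicate_succ]
    have h2 : List.replicate (m + 1) s ++ t :: l' = s :: (List.replicate m s ++ t :: l') := by
      simp [List.replicate_succ]
    have h3 : List.zipWith zzPred (s :: (List.replicate m s ++ t :: l')) (List.replicate m s ++ t :: l') =
        zzZig (List.replicate (m + 1) s ++ t :: l') := by rw [h2, zzZig_cons]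
    rw [h1, zzZig_cons, h2, List.zipWith_cons_cons, zzPred_self, h3, ih, List.replicate_succ]
    rfl

-- placement loop invariant: out = front ++ zeros, pos = |front|; the remaining
-- iterations fill the suffix with the zigzag array of the remaining decoded signs
theorem zzPlace_invariant (R : List (Int × Int)) :
    (∀ r ∈ R, 1 ≤ r.2) → R ≠ [] → ∀ (front : List Int),
    ((R.zip R.tail).foldl zzPlace
        (front ++ List.replicate ((zzDecode R).length - 1) 0, (front.length : Int))).1
      = front ++ zzZig (zzDecode R) := by
  induction R with
  | nil => intro _ h; exact absurd rfl h
  | cons r R' ih =>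
    intro hcnt _ front
    obtain ⟨s, c⟩ := r
    cases R' with
    | nil =>
      have hc : 1 ≤ c := hcnt (s, c) List.mem_cons_self
      obtain ⟨m, hm⟩ : ∃ m, c.toNat = m + 1 := ⟨c.toNat - 1, by omega⟩
      simp only [List.zip, List.tail, List.zipWith, List.foldl_nil, zzDecode,
        List.flatMap_cons, List.flatMap_nil, List.append_nil, hm]
      rw [zzZig_rep_only]
      simp
    | cons r2 R'' =>
      obtain ⟨t, d⟩ := r2
      have hc : 1 ≤ c := hcnt (s, c) List.mem_cons_self
      have hcnt2 : ∀ r ∈ (t, d) :: R'', 1 ≤ r.2 := fun r hr => hcnt r (List.mem_cons_of_mem _ hr)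
      have hd : 1 ≤ d := hcnt2 (t, d) List.mem_cons_self
      have hL2 : 1 ≤ (zzDecode ((t, d) :: R'')).length :=
        zzDecode_len_pos _ hcnt2 (by simp)
      obtain ⟨m, hm⟩ : ∃ m, c.toNat = m + 1 := ⟨c.toNat - 1, by omega⟩
      obtain ⟨md, hmd⟩ : ∃ md, d.toNat = md + 1 := ⟨d.toNat - 1, by omega⟩
      have hdec2 : zzDecode ((t, d) :: R'') = t :: (List.replicate md t ++ zzDecode R'') := by
        simp only [zzDecode, List.flatMap_cons, hmd, List.replicate_succ, List.cons_append]
      have hdec : zzDecode ((s, c) :: (t, d) :: R'') =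
          List.replicate (m + 1) s ++ zzDecode ((t, d) :: R'') := by
        simp only [zzDecode, List.flatMap_cons, hm]
      set L2 := (zzDecode ((t, d) :: R'')).length with hL2def
      have hlen : (zzDecode ((s, c) :: (t, d) :: R'')).length - 1 = m + 1 + (L2 - 1) := by
        rw [hdec]; simp [hL2def]; omega
      have hzip : (((s, c) :: (t, d) :: R'').zip (((s, c) :: (t, d) :: R'').tail)) =
          ((s, c), (t, d)) :: (((t, d) :: R'').zip (((t, d) :: R'').tail)) := by
        simp [List.zip]
      rw [hzip, List.foldl_cons, hlen]
      -- the initial zero block splits around position |front| + m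
      have hsplit : List.replicate (m + 1 + (L2 - 1)) (0 : Int) =
          List.replicate m 0 ++ 0 :: List.replicate (L2 - 1) 0 := by
        rw [show m + 1 + (L2 - 1) = m + ((L2 - 1) + 1) by omega, List.replicate_add,
          List.replicate_succ]
      -- one placement step
      have hstep : zzPlace (front ++ List.replicate (m + 1 + (L2 - 1)) 0, (front.length : Int)) ((s, c), (t, d)) =
          ((front ++ List.replicate m 0 ++ [zzPred s t]) ++ List.replicate (L2 - 1) 0,
            ((front ++ List.replicate m 0 ++ [zzPred s t]).length : Int)) := by
        have hpos : ((front.length : Int) + c - 1).toNat = front.length + m := by omega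
        by_cases hst : s * t = -1
        · have hp : zzPred s t = 1 := by simp [zzPred, hst]
          simp only [zzPlace, if_pos hst, hpos, hsplit, hp, Prod.mk.injEq]
          refine ⟨?_, ?_⟩
          · rw [show front ++ (List.replicate m (0:Int) ++ 0 :: List.replicate (L2-1) 0) =
                (front ++ List.replicate m 0) ++ 0 :: List.replicate (L2-1) 0 by simp,
              List.set_append, if_neg (by simp)]
            simp
          · simp only [List.length_append, List.length_replicate, List.length_cons,
              List.length_nil]
            push_cast
            omega
        · have hp : zzPred s t = 0 := by simp [zzPred, hst]
          simp only [zzPlace, if_neg hst, hsplit, hp, Prod.mk.injEq]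
          refine ⟨by simp, ?_⟩
          simp only [List.length_append, List.length_replicate, List.length_cons,
            List.length_nil]
          push_cast
          omega
      rw [hstep]
      have hIH := ih hcnt2 (by simp) (front ++ List.replicate m 0 ++ [zzPred s t])
      rw [hIH, hdec, hdec2, zzZig_rep, ← hdec2]
      simp

theorem opp_sign_iff (a b c : Int) :
    zzPred (zzSgn a b) (zzSgn b c) = (if (a > b ∧ b < c) ∨ (a < b ∧ b > c) then (1:Int) else 0) := by
  unfold zzPred zzSgn
  split_ifs <;> omega

-- A as a map over the index range
theorem isZigzag_eq_map (numbers : List Int) :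
    isZigzag numbers =
      (PySem.List.pyRange 0 ((numbers.length : Int) - 2) 1).map
        (fun i =>
          if (PySem.List.pyGetD numbers i 0 > PySem.List.pyGetD numbers (i+1) 0 ∧
                PySem.List.pyGetD numbers (i+1) 0 < PySem.List.pyGetD numbers (i+2) 0) ∨
             (PySem.List.pyGetD numbers i 0 < PySem.List.pyGetD numbers (i+1) 0 ∧
                PySem.List.pyGetD numbers (i+1) 0 > PySem.List.pyGetD numbers (i+2) 0)
          then (1 : Int) else 0) := by
  unfold isZigzag
  have h := PySem.List.foldl_append_singleton_eq_map
    (l := PySem.List.pyRange 0 ((numbers.length : Int) - 2) 1)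
    (f := fun i =>
      if (PySem.List.pyGetD numbers i 0 > PySem.List.pyGetD numbers (i+1) 0 ∧
            PySem.List.pyGetD numbers (i+1) 0 < PySem.List.pyGetD numbers (i+2) 0) ∨
         (PySem.List.pyGetD numbers i 0 < PySem.List.pyGetD numbers (i+1) 0 ∧
            PySem.List.pyGetD numbers (i+1) 0 > PySem.List.pyGetD numbers (i+2) 0)
      then (1 : Int) else 0) (acc := [])
  simp only [List.nil_append] at h
  rw [← h]
  congr 1
  funext acc i
  split <;> rfl

-- A equals the reference zigzag array of the difference-sign sequence
theorem isZigzag_eq_zig (numbers : List Int) :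
    isZigzag numbers = zzZig (List.zipWith zzSgn numbers numbers.tail) := by
  rw [isZigzag_eq_map]
  unfold zzZig
  set n := numbers.length with hn
  apply List.ext_getElem
  · simp [PySem.List.length_pyRange_one, List.length_zipWith, List.length_tail]
    omega
  · intro k hk1 hk2
    simp only [List.getElem_map, PySem.List.getElem_pyRange_one, List.getElem_zipWith,
      List.getElem_tail]
    simp only [List.length_map, PySem.List.length_pyRange_one] at hk1
    have hk : k + 2 < n := by omega
    have g0 : PySem.List.pyGetD numbers ((0 : Int) + k) 0 = numbers[k] := by
      rw [show ((0:Int) + k) = (k : Int) by omega]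
      rw [PySem.List.pyGetD_natCast]
      exact List.getD_eq_getElem numbers 0 (by omega)
    have g1 : PySem.List.pyGetD numbers ((0 : Int) + k + 1) 0 = numbers[k+1] := by
      rw [show ((0:Int) + k + 1) = ((k+1 : Nat) : Int) by push_cast; ring]
      rw [PySem.List.pyGetD_natCast]
      exact List.getD_eq_getElem numbers 0 (by omega)
    have g2 : PySem.List.pyGetD numbers ((0 : Int) + k + 2) 0 = numbers[k+2] := by
      rw [show ((0:Int) + k + 2) = ((k+2 : Nat) : Int) by push_cast; ring]
      rw [PySem.List.pyGetD_natCast]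
      exact List.getD_eq_getElem numbers 0 (by omega)
    rw [g0, g1, g2, ← opp_sign_iff]

theorem isZigzag_eq_alt (numbers : List Int) : isZigzag numbers = isZigzag_alt numbers := by
  by_cases h3 : numbers.length < 3
  · rw [isZigzag_eq_zig]
    unfold isZigzag_alt
    rw [if_pos h3]
    have hl : (zzZig (List.zipWith zzSgn numbers numbers.tail)).length = 0 := by
      simp [zzZig, List.length_zipWith, List.length_tail]
      omega
    exact List.eq_nil_of_length_eq_zero hl
  · obtain ⟨a, b, rest, rfl⟩ : ∃ a b rest, numbers = a :: b :: rest := by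
      cases numbers with
      | nil => simp at h3
      | cons a t =>
        cases t with
        | nil => simp at h3
        | cons b rest => exact ⟨a, b, rest, rfl⟩
    unfold isZigzag_alt
    rw [if_neg h3]
    simp only [List.tail_cons, List.headI, List.foldl_cons]
    have hfirst : zzStep ([], a) b = ([(zzSgn a b, 1)], b) := rfl
    rw [hfirst]
    have hruns : (rest.foldl zzStep ([(zzSgn a b, 1)], b)).1 =
        zzRle (zzSgn a b) 1 (zzSgnList b rest) := by
      have := zzFold_eq_rle rest b [] (zzSgn a b) 1
      simpa using this
    rw [hruns]
    set runs := zzRle (zzSgn a b) 1 (zzSgnList b rest) with hrunsdef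
    have hcnt : ∀ r ∈ runs, 1 ≤ r.2 := zzRle_counts _ _ _ (by omega)
    have hne : runs ≠ [] := zzRle_ne_nil _ _ _
    have hdec : zzDecode runs = zzSgn a b :: zzSgnList b rest := by
      rw [hrunsdef, zzDecode_rle _ _ _ (by omega)]
      rfl
    have hlen : (a :: b :: rest).length - 2 = (zzDecode runs).length - 1 := by
      rw [hdec]
      simp [zzSgnList_length]
    have hinv := zzPlace_invariant runs hcnt hne []
    simp only [List.nil_append, List.length_nil, Nat.cast_zero] at hinv
    rw [hlen, hinv, hdec, isZigzag_eq_zig]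
    have : List.zipWith zzSgn (a :: b :: rest) (a :: b :: rest).tail =
        zzSgn a b :: zzSgnList b rest := by
      rw [List.tail_cons, List.zipWith_cons_cons, zzSgnList_eq_zipWith]
    rw [this]

-- ===== VERDICT (by name: the statement is the Claim_ definition above) =====
theorem isZigzag_spec : Claim_equal_isZigzag := by
  intro numbers _
  exact isZigzag_eq_alt numbers
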